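-- pv_equiv track=rewrite | github.com/tsmdt/UBi | code/crawler_utils.py | extract_content_after_yaml_header
-- ===== SOURCE A (Python) =====
-- def extract_content_after_yaml_header(content: str) -> str:
--     """
--     Extract content after YAML header (after second '---').
--
--     Args:
--         content: Markdown content with YAML header
--
--     Returns:
--         Content after YAML header
--     """
--     lines = content.split('\n')
--     content_start = 0
--     yaml_end_count = 0
--
--     for i, line in enumerate(lines):
--         if line.strip() == '---':
--             yaml_end_count += 1
--             if yaml_end_count == 2:
--                 content_start = i + 1
--                 break
--
--     return '\n'.join(lines[content_start:]).strip()
-- ===== SOURCE B (Python) =====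
-- def _after_marker(lines):
--     """Return the list of lines strictly after the first '---' delimiter line,
--     or None if there is no such line."""
--     it = iter(lines)
--     for line in it:
--         if line.strip() == '---':
--             return list(it)
--     return None
--
--
-- def extract_content_after_yaml_header(content: str) -> str:
--     """Extract content after YAML header (after second '---')."""
--     lines = content.split('\n')
--     rest = _after_marker(lines)
--     body = _after_marker(rest) if rest is not None else None
--     return '\n'.join(body if body is not None else lines).strip()
-- ===== Notes on version B (the rewrite author's own statement) =====
-- stated objective: alternative
-- what changed: Replaces the indexed count-to-two scan plus slicing of the original list by composing two suffix-taking passes: a helper returns the list suffix after the first delimiter line, applied twice, so no indices, counters or slicing are used.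
import Mathlib
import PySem

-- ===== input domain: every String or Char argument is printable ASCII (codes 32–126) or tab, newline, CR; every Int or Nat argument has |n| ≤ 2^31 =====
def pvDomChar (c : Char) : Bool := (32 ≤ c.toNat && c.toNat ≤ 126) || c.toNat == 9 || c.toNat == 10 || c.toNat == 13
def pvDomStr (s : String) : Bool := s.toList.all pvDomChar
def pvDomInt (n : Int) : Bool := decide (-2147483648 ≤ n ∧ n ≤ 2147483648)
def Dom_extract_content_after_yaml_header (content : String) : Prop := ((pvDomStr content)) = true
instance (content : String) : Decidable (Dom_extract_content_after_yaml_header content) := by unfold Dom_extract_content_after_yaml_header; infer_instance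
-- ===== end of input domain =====

-- B recasts the task without indices: a helper takes the suffix after the first '---' line, applied twice.

-- ===== PORT A =====
-- the for-loop with the counter and the break, over enumerate(lines)
def pvALoop : List (Int × String) → Int → Int → Int
  | [], content_start, _ => content_start
  | (i, line) :: rest, content_start, yaml_end_count =>
    if PySem.Str.strip line = "---" then
      let yaml_end_count := yaml_end_count + 1
      if yaml_end_count = 2 then i + 1
      else pvALoop rest content_start yaml_end_count
    else pvALoop rest content_start yaml_end_count

def extract_content_after_yaml_header (content : String) : String :=
  let lines := (PySem.Str.split? content "\n").getD []  -- split? = none only for sep = ''; sep here is "\n"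
  let content_start := pvALoop (PySem.List.enumerate lines) 0 0
  PySem.Str.strip (PySem.Str.join "\n" (PySem.List.slice lines (some content_start) none))

-- ===== PORT B =====
-- _after_marker: the lines strictly after the first '---' line, or none
def pvAfterMarker : List String → Option (List String)
  | [] => none
  | l :: rest => if PySem.Str.strip l = "---" then some rest else pvAfterMarker rest

def extract_content_after_yaml_header_alt (content : String) : String :=
  let lines := (PySem.Str.split? content "\n").getD []  -- split? = none only for sep = ''; sep here is "\n"
  let rest := pvAfterMarker lines
  let body := match rest with
    | some r => pvAfterMarker r
    | none => none
  PySem.Str.strip (PySem.Str.join "\n" (body.getD lines))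

-- ===== PRECONDITION & SPEC =====
def Spec_extract_content_after_yaml_header (content : String) (out : String) : Prop := out = extract_content_after_yaml_header_alt content
instance (content : String) (out : String) : Decidable (Spec_extract_content_after_yaml_header content out) := by unfold Spec_extract_content_after_yaml_header; infer_instance

-- ===== CLAIM =====
def Claim_equal_extract_content_after_yaml_header : Prop := ∀ (content : String), Dom_extract_content_after_yaml_header content → Spec_extract_content_after_yaml_header content (extract_content_after_yaml_header content)

-- ===== LEMMAS AND PROOFS =====

-- the suffix returned by pvAfterMarker is a proper suffix
theorem pvAfterMarker_suffix : ∀ (l r : List String), pvAfterMarker l = some r → r.length < l.length ∧ r <:+ l := by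
  intro l
  induction l with
  | nil => intro r h; simp [pvAfterMarker] at h
  | cons x t ih =>
    intro r h
    by_cases hx : PySem.Str.strip x = "---"
    · simp [pvAfterMarker, hx] at h
      subst h
      exact ⟨by simp, List.suffix_cons _ _⟩
    · simp [pvAfterMarker, hx] at h
      obtain ⟨h1, h2⟩ := ih r h
      exact ⟨by simpa using Nat.lt_succ_of_lt h1, h2.trans (List.suffix_cons _ _)⟩

-- dropping down to a suffix's length recovers the suffix
theorem drop_of_suffix (l r : List String) (h : r <:+ l) : l.drop (l.length - r.length) = r := by
  obtain ⟨p, rfl⟩ := h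
  have hl : (p ++ r).length - r.length = p.length := by simp
  rw [hl, List.drop_left]

-- A's loop after one delimiter seen: index just past the next delimiter, or cs
theorem pvALoop_one (l : List String) (s cs : Int) :
    pvALoop (PySem.List.enumerate l s) cs 1 =
      match pvAfterMarker l with
      | some r => s + ((l.length - r.length : Nat) : Int)
      | none => cs := by
  induction l generalizing s with
  | nil => simp [pvALoop, pvAfterMarker, PySem.List.enumerate_nil]
  | cons x t ih =>
    by_cases hx : PySem.Str.strip x = "---"
    · simp [PySem.List.enumerate_cons, pvALoop, hx, pvAfterMarker]
    · rw [PySem.List.enumerate_cons]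
      simp only [pvALoop, hx, if_false, ih]
      cases hr : pvAfterMarker t with
      | none => simp [pvAfterMarker, hx, hr]
      | some r =>
        have := (pvAfterMarker_suffix t r hr).1
        simp [pvAfterMarker, hx, hr]
        have hc : (t.length + 1 - r.length) = (t.length - r.length) + 1 := by omega
        rw [hc]
        push_cast
        ring

-- A's loop from scratch: index just past the second delimiter, or cs
theorem pvALoop_zero (l : List String) (s cs : Int) :
    pvALoop (PySem.List.enumerate l s) cs 0 =
      match pvAfterMarker l with
      | some r1 =>
        match pvAfterMarker r1 with
        | some r2 => s + ((l.length - r2.length : Nat) : Int)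
        | none => cs
      | none => cs := by
  induction l generalizing s with
  | nil => simp [pvALoop, pvAfterMarker, PySem.List.enumerate_nil]
  | cons x t ih =>
    by_cases hx : PySem.Str.strip x = "---"
    · rw [PySem.List.enumerate_cons]
      simp only [pvALoop, hx, if_true]
      norm_num
      rw [pvALoop_one]
      cases hr : pvAfterMarker t with
      | none => simp [pvAfterMarker, hx, hr]
      | some r =>
        have := (pvAfterMarker_suffix t r hr).1
        simp [pvAfterMarker, hx, hr]
        have hc : (t.length + 1 - r.length) = (t.length - r.length) + 1 := by omega
        rw [hc]
        push_cast
        ring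
    · rw [PySem.List.enumerate_cons]
      simp only [pvALoop, hx, if_false, ih]
      cases hr : pvAfterMarker t with
      | none => simp [pvAfterMarker, hx, hr]
      | some r1 =>
        cases hr2 : pvAfterMarker r1 with
        | none => simp [pvAfterMarker, hx, hr, hr2]
        | some r2 =>
          have h1 := (pvAfterMarker_suffix t r1 hr).1
          have h2 := (pvAfterMarker_suffix r1 r2 hr2).1
          simp [pvAfterMarker, hx, hr, hr2]
          have hc : (t.length + 1 - r2.length) = (t.length - r2.length) + 1 := by omega
          rw [hc]
          push_cast
          ring

-- ===== VERDICT =====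
theorem extract_content_after_yaml_header_spec : Claim_equal_extract_content_after_yaml_header := by
  intro content _
  unfold Spec_extract_content_after_yaml_header extract_content_after_yaml_header extract_content_after_yaml_header_alt
  simp only [pvALoop_zero]
  cases hr : pvAfterMarker ((PySem.Str.split? content "\n").getD []) with
  | none => simp [PySem.List.slice_zero_start, PySem.List.slice_none_none]
  | some r1 =>
    cases hr2 : pvAfterMarker r1 with
    | none => simp [hr2, PySem.List.slice_zero_start, PySem.List.slice_none_none]
    | some r2 =>
      have h1 := (pvAfterMarker_suffix _ r1 hr).2
      have h2 := (pvAfterMarker_suffix r1 r2 hr2).2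
      have hsuf : r2 <:+ (PySem.Str.split? content "\n").getD [] := h2.trans h1
      simp only [hr2, zero_add, PySem.List.slice_from_natCast, Option.getD_some]
      rw [drop_of_suffix _ _ hsuf]
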